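-- pv_equiv track=rewrite | github.com/a01748155/Mision-09 | Mision_09.py | intercambiarMM
-- ===== SOURCE A (Python) =====
-- def intercambiarMM(lista):
--     if len(lista) != 0:
--         mayor = lista[0]
--         indiceMayor = 0
--         menor = lista[0]
--         indiceMenor = 0
--         for k in range(len(lista)):
--             if lista[k] > mayor:
--                 mayor = lista[k]
--                 indiceMayor = k # Posición del número mayor
--             if lista[k] < menor:
--                 menor = lista[k]
--                 indiceMenor = k # Posición del número menor
--         lista[indiceMayor] = menor
--         lista[indiceMenor] = mayor
--
--     return lista
-- ===== SOURCE B (Python) =====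
-- def intercambiarMM(lista):
--     if lista:
--         m = max(lista)
--         n = min(lista)
--         i = lista.index(m)
--         j = lista.index(n)
--         lista[i] = n
--         lista[j] = m
--     return lista
-- ===== Notes on version B (the rewrite author's own statement) =====
-- stated objective: idiomatic
-- what changed: Replaces A's single combined tracking loop (running max/min with their indices) by separate library passes: max(lista), min(lista), two first-occurrence index() scans, then the two assignments.
import Mathlib
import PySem

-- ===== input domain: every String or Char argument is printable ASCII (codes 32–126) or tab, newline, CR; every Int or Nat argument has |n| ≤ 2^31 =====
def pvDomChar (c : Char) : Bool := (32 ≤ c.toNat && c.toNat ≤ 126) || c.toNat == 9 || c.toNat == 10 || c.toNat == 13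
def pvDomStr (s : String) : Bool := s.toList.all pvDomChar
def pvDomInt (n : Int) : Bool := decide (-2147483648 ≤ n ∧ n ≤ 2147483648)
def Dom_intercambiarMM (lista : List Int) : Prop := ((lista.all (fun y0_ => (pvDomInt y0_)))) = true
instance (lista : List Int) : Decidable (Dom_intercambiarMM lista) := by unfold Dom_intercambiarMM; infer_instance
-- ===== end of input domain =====

-- B swaps the first maximum and first minimum via separate max/min/index library passes instead of
-- A's single combined tracking loop (idiomatic decomposition, same cost); both Pythons mutate
-- `lista` identically in place, and the equivalence proved here is about the returned list.

-- ===== PORT A =====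
-- body of A's for-loop; state = (mayor, indiceMayor, menor, indiceMenor).
-- lista[k] is read as getD k 0 — exact here since every k produced by range(len(lista)) is in range.
def pvLoopA (lista : List Int) (st : Int × Nat × Int × Nat) (k : Nat) : Int × Nat × Int × Nat :=
  let x := lista.getD k 0
  let st1 := if x > st.1 then (x, k, st.2.2.1, st.2.2.2) else st
  if x < st1.2.2.1 then (st1.1, st1.2.1, x, k) else st1

def intercambiarMM (lista : List Int) : List Int :=
  if lista.length ≠ 0 then
    let s := (List.range lista.length).foldl (pvLoopA lista) (lista.getD 0 0, 0, lista.getD 0 0, 0)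
    (lista.set s.2.1 s.2.2.1).set s.2.2.2 s.1
  else lista

-- ===== PORT B =====
def intercambiarMM_alt (lista : List Int) : List Int :=
  match lista with
  | [] => lista
  | _ :: _ =>
    match PySem.List.max? lista (fun y => y), PySem.List.min? lista (fun y => y) with
    | some m, some n =>
      match PySem.List.index? lista m, PySem.List.index? lista n with
      | some i, some j => (lista.set i n).set j m
      | _, _ => lista   -- unreachable: m and n are members of lista
    | _, _ => lista     -- unreachable: lista is nonempty

-- ===== PRECONDITION & SPEC =====
def Spec_intercambiarMM (lista : List Int) (out : List Int) : Prop := out = intercambiarMM_alt lista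
instance (lista : List Int) (out : List Int) : Decidable (Spec_intercambiarMM lista out) := by unfold Spec_intercambiarMM; infer_instance

-- ===== CLAIM (what is proved, stated in full; the proofs are below) =====
def Claim_equal_intercambiarMM : Prop := ∀ (lista : List Int), Dom_intercambiarMM lista → Spec_intercambiarMM lista (intercambiarMM lista)

-- ===== LEMMAS AND PROOFS =====

-- (M, i) is the first maximum of the first k entries of xs (read via getD, like the loop).
def pvIsMaxUpTo (xs : List Int) (k : Nat) (M : Int) (i : Nat) : Prop :=
  i < k ∧ xs.getD i 0 = M ∧ (∀ j, j < k → xs.getD j 0 ≤ M) ∧ (∀ j, j < i → xs.getD j 0 < M)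

def pvIsMinUpTo (xs : List Int) (k : Nat) (m : Int) (i : Nat) : Prop :=
  i < k ∧ xs.getD i 0 = m ∧ (∀ j, j < k → m ≤ xs.getD j 0) ∧ (∀ j, j < i → m < xs.getD j 0)

-- one loop iteration, written out by cases (the second `if` always tests against the OLD menor,
-- since the first branch only changes the mayor components)
theorem pvLoopA_cases (xs : List Int) (st : Int × Nat × Int × Nat) (k : Nat) :
    pvLoopA xs st k =
      if xs.getD k 0 > st.1 then
        (if xs.getD k 0 < st.2.2.1 then (xs.getD k 0, k, xs.getD k 0, k) else (xs.getD k 0, k, st.2.2.1, st.2.2.2))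
      else (if xs.getD k 0 < st.2.2.1 then (st.1, st.2.1, xs.getD k 0, k) else st) := by
  rcases st with ⟨M, i, m, i'⟩
  simp only [pvLoopA]
  split_ifs <;> simp_all

-- loop invariant: after the first k iterations the state holds the first max and first min of xs[0:k]
theorem pvLoopA_inv (xs : List Int) (k : Nat) (hk1 : 1 ≤ k) :
    pvIsMaxUpTo xs k ((List.range k).foldl (pvLoopA xs) (xs.getD 0 0, 0, xs.getD 0 0, 0)).1
      ((List.range k).foldl (pvLoopA xs) (xs.getD 0 0, 0, xs.getD 0 0, 0)).2.1 ∧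
    pvIsMinUpTo xs k ((List.range k).foldl (pvLoopA xs) (xs.getD 0 0, 0, xs.getD 0 0, 0)).2.2.1
      ((List.range k).foldl (pvLoopA xs) (xs.getD 0 0, 0, xs.getD 0 0, 0)).2.2.2 := by
  induction k with
  | zero => omega
  | succ k ih =>
    by_cases hk : 1 ≤ k
    · obtain ⟨⟨hi, hvi, hub, hstrict⟩, ⟨hi', hvi', hlb, hstrict'⟩⟩ := ih hk
      rw [List.range_succ, List.foldl_append, List.foldl_cons, List.foldl_nil, pvLoopA_cases]
      set st := (List.range k).foldl (pvLoopA xs) (xs.getD 0 0, 0, xs.getD 0 0, 0) with hst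
      by_cases h1 : xs.getD k 0 > st.1 <;> by_cases h2 : xs.getD k 0 < st.2.2.1 <;>
        simp only [h1, h2, if_pos, if_neg, not_false_iff]
      · exact ⟨⟨Nat.lt_succ_self k, rfl,
            fun j hj => (Nat.lt_succ_iff_lt_or_eq.mp hj).elim
              (fun h => le_of_lt (lt_of_le_of_lt (hub j h) h1)) (fun h => h ▸ le_refl _),
            fun j hj => lt_of_le_of_lt (hub j hj) h1⟩,
          ⟨Nat.lt_succ_self k, rfl,
            fun j hj => (Nat.lt_succ_iff_lt_or_eq.mp hj).elim
              (fun h => le_of_lt (lt_of_lt_of_le h2 (hlb j h))) (fun h => h ▸ le_refl _),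
            fun j hj => lt_of_lt_of_le h2 (hlb j hj)⟩⟩
      · exact ⟨⟨Nat.lt_succ_self k, rfl,
            fun j hj => (Nat.lt_succ_iff_lt_or_eq.mp hj).elim
              (fun h => le_of_lt (lt_of_le_of_lt (hub j h) h1)) (fun h => h ▸ le_refl _),
            fun j hj => lt_of_le_of_lt (hub j hj) h1⟩,
          ⟨by omega, hvi',
            fun j hj => (Nat.lt_succ_iff_lt_or_eq.mp hj).elim (hlb j)
              (fun h => h ▸ not_lt.mp h2),
            hstrict'⟩⟩
      · exact ⟨⟨by omega, hvi,
            fun j hj => (Nat.lt_succ_iff_lt_or_eq.mp hj).elim (hub j)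
              (fun h => h ▸ not_lt.mp h1),
            hstrict⟩,
          ⟨Nat.lt_succ_self k, rfl,
            fun j hj => (Nat.lt_succ_iff_lt_or_eq.mp hj).elim
              (fun h => le_of_lt (lt_of_lt_of_le h2 (hlb j h))) (fun h => h ▸ le_refl _),
            fun j hj => lt_of_lt_of_le h2 (hlb j hj)⟩⟩
      · exact ⟨⟨by omega, hvi,
            fun j hj => (Nat.lt_succ_iff_lt_or_eq.mp hj).elim (hub j)
              (fun h => h ▸ not_lt.mp h1),
            hstrict⟩,
          ⟨by omega, hvi',
            fun j hj => (Nat.lt_succ_iff_lt_or_eq.mp hj).elim (hlb j)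
              (fun h => h ▸ not_lt.mp h2),
            hstrict'⟩⟩
    · have hk0 : k = 0 := by omega
      subst hk0
      rw [List.range_one, List.foldl_cons, List.foldl_nil, pvLoopA_cases]
      simp only [lt_irrefl, ite_false]
      refine ⟨⟨Nat.zero_lt_one, rfl, ?_, ?_⟩, ⟨Nat.zero_lt_one, rfl, ?_, ?_⟩⟩ <;>
        intro j hj
      · interval_cases j; exact le_refl _
      · omega
      · interval_cases j; exact le_refl _
      · omega

-- .index finds position i when xs[i] = v and v does not occur before i
theorem pvIndex?_of_first (xs : List Int) (v : Int) (i : Nat) (hi : i < xs.length)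
    (hv : xs[i] = v) (hfirst : ∀ j (hj : j < xs.length), j < i → xs[j] ≠ v) :
    PySem.List.index? xs v = some i := by
  rw [PySem.List.index?_eq_some_iff]
  refine ⟨xs.take i, xs.drop (i + 1), ?_, by simp [hi.le], ?_⟩
  · conv_lhs => rw [← List.take_append_drop i xs]
    congr 1
    rw [← hv]
    exact (List.getElem_cons_drop hi).symm
  · intro hmem
    obtain ⟨j, hj, hje⟩ := List.mem_iff_getElem.mp hmem
    have hjl : j < i := by
      have := List.length_take_le i xs; omega
    have hje' : xs[j]'(by omega) = v := by
      rw [← hje]; exact (List.getElem_take).symm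
    exact hfirst j (by omega) hjl hje'

theorem pv_main (lista : List Int) : intercambiarMM lista = intercambiarMM_alt lista := by
  match lista with
  | [] => rfl
  | h :: t =>
    set xs : List Int := h :: t with hxs
    have hlen : 1 ≤ xs.length := by simp [hxs]
    obtain ⟨⟨hi, hvi, hub, hstrict⟩, ⟨hi', hvi', hlb, hstrict'⟩⟩ := pvLoopA_inv xs xs.length hlen
    set s := (List.range xs.length).foldl (pvLoopA xs) (xs.getD 0 0, 0, xs.getD 0 0, 0) with hs
    have hgetD : ∀ j (hj : j < xs.length), xs.getD j 0 = xs[j] := fun j hj => List.getD_eq_getElem xs 0 hj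
    have hMmem : s.1 ∈ xs := by rw [← hvi, hgetD s.2.1 hi]; exact List.getElem_mem hi
    have hmmem : s.2.2.1 ∈ xs := by rw [← hvi', hgetD s.2.2.2 hi']; exact List.getElem_mem hi'
    have hMax : t.foldl max h = s.1 := by
      apply le_antisymm
      · have hfmem : t.foldl max h ∈ xs := by
          rcases PySem.List.foldl_max_mem t h with hcase | hcase
          · rw [hcase]; exact List.mem_cons_self
          · exact List.mem_cons_of_mem h hcase
        obtain ⟨j, hj, hje⟩ := List.mem_iff_getElem.mp hfmem
        rw [← hje, ← hgetD j hj]; exact hub j hj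
      · obtain ⟨hh, ht⟩ := PySem.List.le_foldl_max t h
        rcases List.mem_cons.mp hMmem with hc | hc
        · exact hc ▸ hh
        · exact ht _ hc
    have hMin : t.foldl min h = s.2.2.1 := by
      apply le_antisymm
      · obtain ⟨hh, ht⟩ := PySem.List.foldl_min_le t h
        rcases List.mem_cons.mp hmmem with hc | hc
        · exact hc ▸ hh
        · exact ht _ hc
      · have hfmem : t.foldl min h ∈ xs := by
          rcases PySem.List.foldl_min_mem t h with hcase | hcase
          · rw [hcase]; exact List.mem_cons_self
          · exact List.mem_cons_of_mem h hcase
        obtain ⟨j, hj, hje⟩ := List.mem_iff_getElem.mp hfmem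
        rw [← hje, ← hgetD j hj]; exact hlb j hj
    have hidxM : PySem.List.index? xs s.1 = some s.2.1 := by
      apply pvIndex?_of_first xs s.1 s.2.1 hi
      · rw [← hgetD s.2.1 hi]; exact hvi
      · intro j hj hji
        rw [← hgetD j hj]
        exact ne_of_lt (hstrict j hji)
    have hidxm : PySem.List.index? xs s.2.2.1 = some s.2.2.2 := by
      apply pvIndex?_of_first xs s.2.2.1 s.2.2.2 hi'
      · rw [← hgetD s.2.2.2 hi']; exact hvi'
      · intro j hj hji
        rw [← hgetD j hj]
        exact (ne_of_lt (hstrict' j hji)).symm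
    show intercambiarMM xs = intercambiarMM_alt xs
    rw [intercambiarMM, intercambiarMM_alt]
    rw [if_pos (by omega : xs.length ≠ 0)]
    have hmax? : PySem.List.max? xs (fun y => y) = some s.1 := by
      rw [hxs, PySem.List.max?_id_cons, hMax]
    have hmin? : PySem.List.min? xs (fun y => y) = some s.2.2.1 := by
      rw [hxs, PySem.List.min?_id_cons, hMin]
    simp only [← hs, ← hxs, hmax?, hmin?, hidxM, hidxm]

-- ===== VERDICT (by name: the statement is the Claim_ definition above) =====
theorem intercambiarMM_spec : Claim_equal_intercambiarMM := by
  intro lista _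
  unfold Spec_intercambiarMM
  exact pv_main lista
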